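-- pv_equiv track=rewrite | github.com/jonsyou/TIL | algorithm/programmers/kakao_new-id-recommendation-problem.py | solution
-- ===== SOURCE A (Python) =====
-- def solution(new_id):
--
--     # step1
--     new_id = new_id.lower()
--
--     # step2
--     u1 = [chr(i) for i in range(ord('a'),ord('z')+1)]
--     u2 = [str(i) for i in range(10)]
--     u3 = ['-','_','.']
--
--     u = u1+u2+u3
--
--     new_id = [i for i in new_id if i in u]
--
--     # step3
--     temp, temp_ = '', ''
--     for i in new_id :
--         if i == '.' and temp_ == '.':
--             continue
--         else:
--             temp += i
--             temp_ = i
--     new_id = temp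
--
--     # step4
--     while True:
--         if new_id == '':
--             break
--         elif new_id[0] == '.':
--             new_id = new_id[1:]
--         elif new_id[-1] == '.':
--             new_id = new_id[:-1]
--         else:
--             break
--
--     # step5
--     if new_id == '':
--         new_id = 'a'
--
--     # step6
--     if len(new_id) >= 16:
--         new_id = new_id[:15]
--
--     while True:
--         if new_id[-1] == '.':
--             new_id = new_id[:-1]
--         else:
--             break
--
--     # step7
--     while len(new_id) <= 2:
--         new_id += new_id[-1]
--
--     answer = new_id
--     return answer
-- ===== SOURCE B (Python) =====
-- # B: single state-machine pass that filters, collapses dot runs and drops leading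
-- # dots at once; since the pass never emits two adjacent dots, each trailing-dot
-- # strip is a single conditional pop, and the final pad is a closed-form repeat.
-- def _drop_tail_dot(s):
--     return s[:-1] if s.endswith('.') else s
--
--
-- def solution(new_id):
--     out = []
--     for c in new_id.lower():
--         if c in 'abcdefghijklmnopqrstuvwxyz0123456789-_':
--             out.append(c)
--         elif c == '.' and out and out[-1] != '.':
--             out.append('.')
--     s = _drop_tail_dot(''.join(out)) or 'a'
--     s = _drop_tail_dot(s[:15])
--     return s + s[-1] * (3 - len(s))
-- ===== Notes on version B (the rewrite author's own statement) =====
-- stated objective: simpler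
-- what changed: Replaces A's five separate passes (filter against a built character list, a two-register string-concatenation collapse loop, an alternating leading/trailing strip loop, and two rstrip while-loops) by one list-accumulator state-machine pass that filters, collapses dot runs and drops leading dots simultaneously, after which each trailing-dot strip is a single conditional pop and the pad-to-3 is a closed-form repeat.
import Mathlib
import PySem

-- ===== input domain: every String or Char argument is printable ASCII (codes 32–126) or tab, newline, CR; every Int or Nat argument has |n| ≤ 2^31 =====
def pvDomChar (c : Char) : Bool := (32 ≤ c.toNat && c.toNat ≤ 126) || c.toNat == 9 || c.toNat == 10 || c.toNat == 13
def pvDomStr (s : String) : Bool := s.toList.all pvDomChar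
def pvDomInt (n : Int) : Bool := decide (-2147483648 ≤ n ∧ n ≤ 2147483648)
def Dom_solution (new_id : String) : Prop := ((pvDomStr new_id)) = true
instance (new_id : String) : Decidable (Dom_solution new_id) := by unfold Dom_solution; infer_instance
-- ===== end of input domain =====

-- B is one combined state-machine pass instead of A's five separate passes; return values proved equal.

-- ===== PORT A =====
-- u = u1 + u2 + u3, the allowed characters as Python builds them (chr over range(ord('a'),ord('z')+1), str over range(10))
def uA : List (List Char) :=
  (PySem.List.pyRange 97 (122 + 1)).map (fun i => [Char.ofNat i.toNat])
    ++ (PySem.List.pyRange 0 10).map (fun i => PySem.Int.toChars i)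
    ++ [['-'], ['_'], ['.']]

-- step3 loop body: state (temp, temp_); temp_ is '' or the last appended one-char string
def A_step3 (st : List Char × List Char) (i : Char) : List Char × List Char :=
  if i = '.' ∧ st.2 = ['.'] then st else (st.1 ++ [i], [i])

-- step4 while-loop: new_id[1:] ported as tail (= PySem.List.slice_from_one), new_id[:-1] as dropLast
-- (= PySem.List.slice_to_neg_one), new_id[-1] as PySem.List.pyGet? _ (-1)
def A_strip4 (l : List Char) : List Char :=
  if l = [] then l
  else if l.head? = some '.' then A_strip4 l.tail
  else if PySem.List.pyGet? l (-1) = some '.' then A_strip4 l.dropLast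
  else l
termination_by l.length
decreasing_by
  · cases l with | nil => simp_all | cons a t => simp
  · cases l with | nil => simp_all | cons a t => simp [List.length_dropLast]

-- step6 while-loop: strip trailing dots (new_id[-1] on the empty string would raise; pyGet? returns none there)
def A_rstripW (l : List Char) : List Char :=
  if PySem.List.pyGet? l (-1) = some '.' then A_rstripW l.dropLast else l
termination_by l.length
decreasing_by
  rename_i h
  cases l with
  | nil => simp [PySem.List.pyGet?] at h
  | cons a t => simp [List.length_dropLast]

-- step7 while-loop: append new_id[-1] until length ≥ 3 (pyGet? none = the IndexError Python would raise on '')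
def A_pad7 (l : List Char) : List Char :=
  if l.length ≤ 2 then
    match PySem.List.pyGet? l (-1) with
    | some c => A_pad7 (l ++ [c])
    | none => l
  else l
termination_by 3 - l.length

def solution (new_id : String) : String :=
  let l := PySem.Chars.lower new_id.toList                         -- step1
  let f := l.filter (fun i => decide ([i] ∈ uA))                   -- step2
  let col := (f.foldl A_step3 ([], [])).1                          -- step3
  let s4 := A_strip4 col                                           -- step4
  let s5 := if s4 = [] then ['a'] else s4                          -- step5
  let s6 := A_rstripW (if 16 ≤ s5.length then PySem.List.slice s5 none (some 15) else s5)  -- step6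
  String.ofList (A_pad7 s6)                                            -- step7

-- ===== PORT B =====
def B_allowed : List Char := "abcdefghijklmnopqrstuvwxyz0123456789-_".toList

-- loop body: filter + collapse dot runs + drop leading dots in one pass (out[-1] is pyGet? out (-1))
def B_step (out : List Char) (c : Char) : List Char :=
  if B_allowed.contains c then out ++ [c]
  else if c = '.' ∧ out ≠ [] ∧ PySem.List.pyGet? out (-1) ≠ some '.' then out ++ ['.']
  else out

-- _drop_tail_dot: s[:-1] if s.endswith('.') else s
def B_dropTailDot (l : List Char) : List Char :=
  if PySem.Chars.endswith l ['.'] then l.dropLast else l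

def solution_alt (new_id : String) : String :=
  let out := (PySem.Chars.lower new_id.toList).foldl B_step []
  let s := let t := B_dropTailDot out; if t = [] then ['a'] else t   -- `or 'a'`
  let s3 := B_dropTailDot (PySem.List.slice s none (some 15))        -- s[:15]
  -- s + s[-1] * (3 - len(s)); pyGet? none = the IndexError s[-1] would raise on ''
  String.ofList (s3 ++ PySem.List.pyRepeat (match PySem.List.pyGet? s3 (-1) with | some c => [c] | none => []) (3 - (s3.length : Int)))

-- ===== PRECONDITION & SPEC =====
def Spec_solution (new_id : String) (out : String) : Prop := out = solution_alt new_id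
instance (new_id : String) (out : String) : Decidable (Spec_solution new_id out) := by unfold Spec_solution; infer_instance

-- ===== CLAIM (what is proved, stated in full; the proofs are below) =====
def Claim_equal_solution : Prop := ∀ (new_id : String), Dom_solution new_id → Spec_solution new_id (solution new_id)

-- ===== LEMMAS AND PROOFS =====
-- proof-side defs
def NoDD (l : List Char) : Prop := l.IsChain (fun a b => ¬(a = '.' ∧ b = '.'))
def lastMark (t : List Char) : List Char := match t.getLast? with | some c => [c] | none => []

lemma pyGet_neg_one (l : List Char) : PySem.List.pyGet? l (-1) = l.getLast? := by simp [pysem]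

lemma endswith_dot (l : List Char) : PySem.Chars.endswith l ['.'] = true ↔ l.getLast? = some '.' := by
  simp only [PySem.Chars.endswith, List.isSuffixOf_iff_suffix]
  constructor
  · rintro ⟨p, rfl⟩; simp [List.getLast?_append]
  · intro h
    obtain ⟨i, rfl⟩ := List.getLast?_eq_some_iff.mp h
    exact ⟨i, rfl⟩

lemma suffix_getLast? {s l : List Char} (h : s <:+ l) (hs : s ≠ []) : l.getLast? = s.getLast? := by
  obtain ⟨p, rfl⟩ := h; exact List.getLast?_append_of_ne_nil p hs

lemma lastMark_eq_dot (t : List Char) : lastMark t = ['.'] ↔ t.getLast? = some '.' := by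
  unfold lastMark; cases h : t.getLast? <;> simp

lemma lastMark_concat (t : List Char) (c : Char) : lastMark (t ++ [c]) = [c] := by
  unfold lastMark; simp

lemma uA_eq : uA = (B_allowed ++ ['.']).map (fun c => [c]) := by decide

lemma mem_uA (c : Char) : (decide ([c] ∈ uA)) = (B_allowed.contains c || (c == '.')) := by
  rw [uA_eq]
  by_cases h1 : c ∈ B_allowed <;> by_cases h2 : c = '.' <;>
    simp_all [List.mem_map, List.contains_eq_mem]

lemma head_dropWhile (l : List Char) : (l.dropWhile (· == '.')).head? ≠ some '.' := by
  induction l with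
  | nil => simp
  | cons a r ih =>
    by_cases h : a = '.'
    · simpa [h] using ih
    · simp [h]

lemma noDD_last {l : List Char} (h : NoDD l) (hd : l.getLast? = some '.') :
    l.dropLast.getLast? ≠ some '.' := by
  induction l with
  | nil => simp
  | cons a r ih =>
    cases r with
    | nil => simp
    | cons b r' =>
      unfold NoDD at h
      rw [List.isChain_cons_cons] at h
      cases r' with
      | nil =>
        simp at hd; subst hd
        simpa using fun ha => h.1 ⟨ha, rfl⟩
      | cons c r'' =>
        have hd' : (b :: c :: r'').getLast? = some '.' := by simpa using hd
        have := ih h.2 hd'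
        simpa [List.dropLast_cons₂] using this

lemma dropWhile_eq_of_head {l : List Char} (h : l.head? ≠ some '.') :
    l.dropWhile (· == '.') = l := by
  cases l with
  | nil => rfl
  | cons a r => simp at h; simp [h]

lemma dropWhile_concat_of_ne (t : List Char) {c : Char} (hc : c ≠ '.') :
    (t ++ [c]).dropWhile (· == '.') = t.dropWhile (· == '.') ++ [c] := by
  rw [List.dropWhile_append]
  split_ifs with h
  · have h0 : t.dropWhile (· == '.') = [] := by simpa [List.isEmpty_iff] using h
    simp [h0, hc]
  · rfl

lemma dropWhile_concat_dot {t : List Char} (ht : t ≠ []) (hlast : t.getLast? ≠ some '.') :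
    (t ++ ['.']).dropWhile (· == '.') = t.dropWhile (· == '.') ++ ['.'] := by
  have hne : t.dropWhile (· == '.') ≠ [] := by
    intro he
    rw [List.dropWhile_eq_nil_iff] at he
    cases hg : t.getLast? with
    | none => exact ht (List.getLast?_eq_none_iff.mp hg)
    | some a =>
      have := he a (List.mem_of_getLast? hg)
      simp at this
      exact hlast (this ▸ hg)
  rw [List.dropWhile_append]
  split_ifs with h
  · exact absurd (by simpa [List.isEmpty_iff] using h) hne
  · rfl

lemma noDD_concat {t : List Char} {c : Char} (h : NoDD t)
    (hc : ∀ a, t.getLast? = some a → ¬(a = '.' ∧ c = '.')) : NoDD (t ++ [c]) := by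
  unfold NoDD at h ⊢
  rw [List.isChain_append]
  refine ⟨h, by simp, ?_⟩
  intro a ha b hb
  simp at hb; subst hb
  exact hc a ha

lemma dropWhile_ne_nil_of_last {t : List Char} (ht : t ≠ []) (hlast : t.getLast? ≠ some '.') :
    t.dropWhile (· == '.') ≠ [] := by
  intro he
  rw [List.dropWhile_eq_nil_iff] at he
  cases hg : t.getLast? with
  | none => exact ht (List.getLast?_eq_none_iff.mp hg)
  | some a =>
    have := he a (List.mem_of_getLast? hg)
    simp at this
    exact hlast (this ▸ hg)

lemma dw_last {t : List Char} (hd : t.dropWhile (· == '.') ≠ []) :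
    (t.dropWhile (· == '.')).getLast? = t.getLast? :=
  (suffix_getLast? (List.dropWhile_suffix _) hd).symm

lemma step_rel (t : List Char) (c : Char) (ht : NoDD t)
    (hc : B_allowed.contains c = true ∨ c = '.') :
    ∃ t', A_step3 (t, lastMark t) c = (t', lastMark t')
      ∧ B_step (t.dropWhile (· == '.')) c = t'.dropWhile (· == '.') ∧ NoDD t' := by
  by_cases hdot : c = '.'
  · subst hdot
    have hcont : B_allowed.contains '.' = false := by decide
    by_cases hlast : t.getLast? = some '.'
    · refine ⟨t, ?_, ?_, ht⟩
      · simp [A_step3, (lastMark_eq_dot t).mpr hlast]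
      · unfold B_step
        rw [hcont]
        by_cases hd : t.dropWhile (· == '.') = []
        · simp [hd]
        · have hdl : (t.dropWhile (· == '.')).getLast? = some '.' := (dw_last hd).trans hlast
          simp [pyGet_neg_one, hdl]
    · refine ⟨t ++ ['.'], ?_, ?_,
        noDD_concat ht (fun a ha h2 => hlast (h2.1 ▸ ha))⟩
      · have hlm : lastMark t ≠ ['.'] := fun he => hlast ((lastMark_eq_dot t).mp he)
        simp [A_step3, hlm, lastMark_concat]
      · unfold B_step
        rw [hcont]
        by_cases htnil : t = []
        · subst htnil; simp
        · have hd := dropWhile_ne_nil_of_last htnil hlast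
          have hdl : (t.dropWhile (· == '.')).getLast? ≠ some '.' := (dw_last hd).symm ▸ hlast
          simp [pyGet_neg_one, hd, hdl, dropWhile_concat_dot htnil hlast]
  · have hcontains : B_allowed.contains c = true := hc.resolve_right hdot
    refine ⟨t ++ [c], ?_, ?_, noDD_concat ht (fun a ha h2 => hdot h2.2)⟩
    · simp [A_step3, hdot, lastMark_concat]
    · unfold B_step
      rw [hcontains]
      simp [dropWhile_concat_of_ne t hdot]

lemma fold_rel (f : List Char) (hf : ∀ c ∈ f, B_allowed.contains c = true ∨ c = '.') :
    ∀ t, NoDD t →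
      (f.foldl B_step (t.dropWhile (· == '.'))
          = (f.foldl A_step3 (t, lastMark t)).1.dropWhile (· == '.'))
      ∧ NoDD (f.foldl A_step3 (t, lastMark t)).1 := by
  induction f with
  | nil => intro t ht; exact ⟨rfl, ht⟩
  | cons c f' ih =>
    intro t ht
    obtain ⟨t', hA, hB, ht'⟩ := step_rel t c ht (hf c (by simp))
    have ih' := ih (fun x hx => hf x (by simp [hx])) t' ht'
    simpa [List.foldl_cons, hA, hB] using ih'

lemma strip4_id {x : List Char} (hh : x.head? ≠ some '.') (hl : x.getLast? ≠ some '.') :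
    A_strip4 x = x := by
  rw [A_strip4]
  split_ifs <;> simp_all [pyGet_neg_one]


lemma head_dropLast {x : List Char} (hh : x.head? ≠ some '.') :
    x.dropLast.head? ≠ some '.' := by
  cases x with
  | nil => simp
  | cons a r =>
    cases r with
    | nil => simp
    | cons b r' => simpa [List.dropLast_cons₂] using hh

lemma strip4_core {l : List Char} (h : NoDD l) (hh : l.head? ≠ some '.') :
    A_strip4 l = B_dropTailDot l := by
  by_cases h3 : l.getLast? = some '.'
  · have hsw : PySem.Chars.endswith l ['.'] = true := (endswith_dot l).mpr h3
    have hne : l ≠ [] := by rintro rfl; simp at h3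
    rw [B_dropTailDot, if_pos hsw, A_strip4, if_neg hne, if_neg hh, pyGet_neg_one, if_pos h3]
    exact strip4_id (head_dropLast hh) (noDD_last h h3)
  · have hsw : ¬ PySem.Chars.endswith l ['.'] = true := fun he => h3 ((endswith_dot l).mp he)
    rw [B_dropTailDot, if_neg hsw]
    exact strip4_id hh h3

lemma strip4_eq {l : List Char} (h : NoDD l) :
    A_strip4 l = B_dropTailDot (l.dropWhile (· == '.')) := by
  cases l with
  | nil => exact strip4_core h (by simp)
  | cons a r =>
    by_cases ha : a = '.'
    · subst ha
      have hr : r.head? ≠ some '.' := by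
        cases r with
        | nil => simp
        | cons b r' =>
          unfold NoDD at h
          rw [List.isChain_cons_cons] at h
          simpa using fun hb => h.1 ⟨rfl, hb⟩
      have hnr : NoDD r := List.IsChain.suffix h (List.suffix_cons _ _)
      have hA : A_strip4 ('.' :: r) = A_strip4 r := by
        rw [A_strip4]; simp
      rw [hA, List.dropWhile_cons_of_pos (by simp), dropWhile_eq_of_head hr]
      exact strip4_core hnr hr
    · rw [dropWhile_eq_of_head (by simpa using ha)]
      exact strip4_core h (by simpa using ha)

lemma rstripW_id {x : List Char} (hx : x.getLast? ≠ some '.') : A_rstripW x = x := by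
  rw [A_rstripW]; simp [pyGet_neg_one, hx]

lemma rstripW_eq {l : List Char} (h : NoDD l) : A_rstripW l = B_dropTailDot l := by
  by_cases h3 : l.getLast? = some '.'
  · rw [B_dropTailDot, if_pos ((endswith_dot l).mpr h3), A_rstripW]
    rw [pyGet_neg_one, if_pos h3]
    exact rstripW_id (noDD_last h h3)
  · rw [B_dropTailDot, if_neg (fun he => h3 ((endswith_dot l).mp he))]
    exact rstripW_id h3

lemma bdtd_head {x : List Char} (hh : x.head? ≠ some '.') :
    (B_dropTailDot x).head? = x.head? := by
  unfold B_dropTailDot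
  split_ifs with hsw
  · rw [endswith_dot] at hsw
    cases x with
    | nil => simp at hsw
    | cons a r =>
      cases r with
      | nil => simp at hsw; exact absurd (by simp [hsw]) hh
      | cons b r' => simp [List.dropLast_cons₂]
  · rfl

lemma bdtd_noDD {x : List Char} (h : NoDD x) : NoDD (B_dropTailDot x) := by
  unfold B_dropTailDot; split_ifs
  · exact h.prefix (List.dropLast_prefix x)
  · exact h

lemma pad7_eq {l : List Char} (hl : l ≠ []) :
    A_pad7 l = l ++ PySem.List.pyRepeat
      (match PySem.List.pyGet? l (-1) with | some c => [c] | none => []) (3 - (l.length : Int)) := by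
  match l with
  | [a] =>
    rw [A_pad7]
    simp only [pyGet_neg_one, List.length_singleton]
    norm_num
    rw [A_pad7]
    simp only [pyGet_neg_one]
    norm_num
    rw [A_pad7]
    simp
  | [a, b] =>
    rw [A_pad7]
    simp only [pyGet_neg_one]
    norm_num
    rw [A_pad7]
    simp
  | a :: b :: c :: r =>
    rw [A_pad7]
    have hlen : ¬ (a :: b :: c :: r).length ≤ 2 := by simp
    rw [if_neg hlen]
    have : (3 - ((a :: b :: c :: r).length : Int)) ≤ 0 := by
      simp only [List.length_cons]
      push_cast
      omega
    cases hg : PySem.List.pyGet? (a :: b :: c :: r) (-1) with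
    | none =>
      rw [pyGet_neg_one] at hg
      simp [List.getLast?_eq_none_iff] at hg
    | some v =>
      rw [PySem.List.pyRepeat_singleton, Int.toNat_of_nonpos this]
      simp

lemma B_fold_filter (l : List Char) (out : List Char) :
    l.foldl B_step out = (l.filter (fun i => decide ([i] ∈ uA))).foldl B_step out := by
  induction l generalizing out with
  | nil => rfl
  | cons c r ih =>
    by_cases hc : decide ([c] ∈ uA) = true
    · simp only [List.filter_cons, hc, if_pos, List.foldl_cons]
      exact ih _
    · have hc' : (B_allowed.contains c || (c == '.')) = false := by
        rw [← mem_uA]; simpa using hc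
      rw [Bool.or_eq_false_iff] at hc'
      have hskip : B_step out c = out := by
        unfold B_step
        rw [hc'.1]
        simp [show ¬ c = '.' by simpa using hc'.2]
      simp only [List.filter_cons, hc, List.foldl_cons, Bool.false_eq_true, hskip]
      exact ih _

theorem sol_eq (nid : String) : solution nid = solution_alt nid := by
  unfold solution solution_alt
  dsimp only
  set L := PySem.Chars.lower nid.toList with hL
  set f := L.filter (fun i => decide ([i] ∈ uA)) with hf
  set col := (f.foldl A_step3 ([], [])).1 with hcol
  have hall : ∀ c ∈ f, B_allowed.contains c = true ∨ c = '.' := by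
    intro c hcmem
    have hm := (List.mem_filter.mp hcmem).2
    rw [mem_uA] at hm
    rcases Bool.or_eq_true_iff.mp hm with h | h
    · exact Or.inl h
    · exact Or.inr (by simpa using h)
  have hNoDDnil : NoDD ([] : List Char) := by unfold NoDD; simp
  have hfr : f.foldl B_step [] = col.dropWhile (· == '.') ∧ NoDD col := by
    simpa [lastMark] using fold_rel f hall [] hNoDDnil
  rw [B_fold_filter, ← hf, hfr.1, strip4_eq hfr.2]
  set s4 := B_dropTailDot (col.dropWhile (· == '.')) with hs4
  have hdNoDD : NoDD (col.dropWhile (· == '.')) :=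
    List.IsChain.suffix hfr.2 (List.dropWhile_suffix _)
  have hs4head : s4.head? ≠ some '.' := by
    rw [hs4, bdtd_head (head_dropWhile col)]
    exact head_dropWhile col
  have hs4noDD : NoDD s4 := bdtd_noDD hdNoDD
  set s5 := (if s4 = [] then ['a'] else s4) with hs5
  have hs5ne : s5 ≠ [] := by
    rw [hs5]; split_ifs with h
    · simp
    · exact h
  have hs5head : s5.head? ≠ some '.' := by
    rw [hs5]; split_ifs with h
    · simp
    · exact hs4head
  have hs5noDD : NoDD s5 := by
    rw [hs5]; split_ifs with h
    · unfold NoDD; simp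
    · exact hs4noDD
  have hslice : PySem.List.slice s5 none (some 15) = s5.take 15 := by
    simp [pysem]
  have hA6 : (if 16 ≤ s5.length then PySem.List.slice s5 none (some 15) else s5)
      = s5.take 15 := by
    split_ifs with h
    · exact hslice
    · exact (List.take_of_length_le (by omega)).symm
  rw [hA6, hslice]
  obtain ⟨a, r, hsr⟩ : ∃ a r, s5 = a :: r := by
    cases h : s5 with
    | nil => exact absurd h hs5ne
    | cons a r => exact ⟨a, r, rfl⟩
  have ht15ne : s5.take 15 ≠ [] := by rw [hsr]; simp
  have ht15head : (s5.take 15).head? ≠ some '.' := by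
    rw [hsr] at hs5head ⊢
    simpa using hs5head
  have ht15noDD : NoDD (s5.take 15) := List.IsChain.prefix hs5noDD (List.take_prefix _ _)
  rw [rstripW_eq ht15noDD]
  have hs6ne : B_dropTailDot (s5.take 15) ≠ [] := by
    intro he
    have := bdtd_head ht15head
    rw [he] at this
    exact ht15ne (List.head?_eq_none_iff.mp this.symm)
  rw [pad7_eq hs6ne]

-- ===== VERDICT (by name: the statement is the Claim_ definition above) =====
theorem solution_spec : Claim_equal_solution := by
  intro new_id _
  unfold Spec_solution
  exact sol_eq new_id
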